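-- pv_equiv track=rewrite | github.com/didi6135/Terrorism-data-analysis | news_service/app/repository/classification.py | get_primary_location
-- ===== SOURCE A (Python) =====
-- def get_primary_location(locations: list, title: str = "") -> str:
--     """
--     Get primary location with enhanced logic for title matches
--     """
--     if not locations:
--         return ""
--
--     # Create location frequency dict
--     location_counts = {}
--     for loc in locations:
--         # Give extra weight to locations in title
--         if title and loc in title:
--             location_counts[loc] = location_counts.get(loc, 0) + 3  # Triple weight for title mentions
--         location_counts[loc] = location_counts.get(loc, 0) + 1
--
--     # Get location with highest count
--     primary_location = max(location_counts.items(), key=lambda x: x[1])[0]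
--     return primary_location
-- ===== SOURCE B (Python) =====
-- def get_primary_location(locations: list, title: str = "") -> str:
--     """Sort-based counting instead of hash accumulation: run-lengths of a sorted copy
--     give each location's frequency; then one argmax scan over the original list applies
--     the closed-form weight count*(4 if title mention else 1).  Strict '>' keeps the
--     first-seen location on ties (duplicates score identically, so they never win)."""
--     srt = sorted(locations)
--     counts = {}
--     i = 0
--     n = len(srt)
--     while i < n:
--         j = i
--         while j < n and srt[j] == srt[i]:
--             j += 1
--         counts[srt[i]] = j - i
--         i = j
--
--     best = ""
--     best_w = -1
--     for loc in locations:
--         w = counts.get(loc, 0) * (4 if title and loc in title else 1)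
--         if w > best_w:
--             best, best_w = loc, w
--     return best
-- ===== Notes on version B (the rewrite author's own statement) =====
-- stated objective: alternative
-- what changed: A accumulates title-weighted scores into a hash dict in one loop and takes max over its items; B never accumulates weights: it counts by sorting a copy and measuring run lengths, then does one argmax scan over the original list with the closed-form weight count*(4 if title mention else 1), strict '>' preserving first-appearance tie-breaking.
import Mathlib
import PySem

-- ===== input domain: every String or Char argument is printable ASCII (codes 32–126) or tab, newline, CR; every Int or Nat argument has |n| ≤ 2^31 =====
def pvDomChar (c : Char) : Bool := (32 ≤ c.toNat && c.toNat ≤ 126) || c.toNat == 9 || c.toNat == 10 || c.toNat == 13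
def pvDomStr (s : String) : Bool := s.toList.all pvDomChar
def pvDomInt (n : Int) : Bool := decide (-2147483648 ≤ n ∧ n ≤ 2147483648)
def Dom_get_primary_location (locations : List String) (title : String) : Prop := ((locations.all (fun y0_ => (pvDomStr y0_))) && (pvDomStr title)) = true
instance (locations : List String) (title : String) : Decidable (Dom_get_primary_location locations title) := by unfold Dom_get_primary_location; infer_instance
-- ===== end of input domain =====

-- B replaces A's weighted-dict accumulation + max-over-items with sort-based counting
-- (run-lengths of a sorted copy) followed by a plain argmax scan over the original list
-- scoring each element by count*(4 or 1); objective: alternative.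

-- ===== PORT A =====
-- literal transliteration of A: one loop accumulating title-weighted counts into a dict,
-- then max over the items by value (first maximal item wins, as in Python).
def get_primary_location (locations : List String) (title : String) : String :=
  if locations = [] then ""
  else
    let location_counts : PySem.Dict String Int :=
      locations.foldl (fun d loc =>
        let d := if !(title == "") && PySem.Str.isIn loc title
                 then d.insert loc (d.getD loc 0 + 3) else d
        d.insert loc (d.getD loc 0 + 1)) PySem.Dict.empty
    (PySem.List.maxD location_counts.items (fun x => x.2) ("", 0)).1

-- ===== PORT B =====
-- B's nested while loops: each outer step consumes one maximal run of equal elements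
-- (inner 'while srt[j] == srt[i]' = takeWhile/dropWhile split) and records its length.
def pvRunsGo (l : List String) (d : PySem.Dict String Int) : PySem.Dict String Int :=
  match l with
  | [] => d
  | x :: t =>
      let same := t.takeWhile (fun y => y == x)
      let rest := t.dropWhile (fun y => y == x)
      pvRunsGo rest (d.insert x ((1 + same.length : Nat) : Int))
termination_by l.length
decreasing_by
  have := List.length_dropWhile_le (fun y => y == x) t
  simp; omega

-- literal transliteration of B: sorted copy, run-length counts, then one running-best
-- scan over the original list, each element scored counts.get(loc,0) * (4 or 1).
def get_primary_location_alt (locations : List String) (title : String) : String :=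
  let srt := PySem.List.sorted locations (fun x => x) false
  let counts := pvRunsGo srt PySem.Dict.empty
  (locations.foldl (fun (acc : String × Int) loc =>
      let w := counts.getD loc 0 *
               (if !(title == "") && PySem.Str.isIn loc title then 4 else 1)
      if acc.2 < w then (loc, w) else acc) ("", -1)).1

-- ===== PRECONDITION & SPEC =====
def Spec_get_primary_location (locations : List String) (title : String) (out : String) : Prop := out = get_primary_location_alt locations title
instance (locations : List String) (title : String) (out : String) : Decidable (Spec_get_primary_location locations title out) := by unfold Spec_get_primary_location; infer_instance

-- ===== CLAIM (what is proved, stated in full; the proofs are below) =====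
def Claim_equal_get_primary_location : Prop := ∀ (locations : List String) (title : String), Dom_get_primary_location locations title → Spec_get_primary_location locations title (get_primary_location locations title)

-- ===== LEMMAS AND PROOFS =====

-- per-occurrence weight: 4 when the (nonempty) title contains the location, else 1
def pvWeight (title loc : String) : Int :=
  if !(title == "") && PySem.Str.isIn loc title then 4 else 1

theorem pvWeight_pos (title loc : String) : 0 < pvWeight title loc := by
  unfold pvWeight; split_ifs <;> omega

-- the running-best step shared by the selection arguments
def pvStep (f : String → Int) (acc : String × Int) (k : String) : String × Int :=
  if acc.2 < f k then (k, f k) else acc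

theorem pvStep_snd_ge (f : String → Int) (a : String × Int) (x : String) :
    a.2 ≤ (pvStep f a x).2 := by
  unfold pvStep; split_ifs with h <;> omega

theorem pvStep_snd_ge_f (f : String → Int) (a : String × Int) (x : String) :
    f x ≤ (pvStep f a x).2 := by
  unfold pvStep; split_ifs with h <;> omega

-- elements whose score is already dominated are no-ops of the scan
theorem pvFold_filter_skip (f : String → Int) (s : List String) :
    ∀ (a : String × Int) (x : String), f x ≤ a.2 →
    (s.filter (fun y => !y == x)).foldl (pvStep f) a = s.foldl (pvStep f) a := by
  induction s with
  | nil => intro a x _; rfl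
  | cons y t ih =>
    intro a x hx
    by_cases hyx : y = x
    · subst hyx
      have hstep : pvStep f a y = a := by
        unfold pvStep; rw [if_neg (by omega)]
      simp only [List.filter_cons, beq_self_eq_true, Bool.not_true, List.foldl_cons, hstep]
      exact ih a y hx
    · have : (!y == x) = true := by simp [hyx]
      simp only [List.filter_cons, this, List.foldl_cons]
      exact ih (pvStep f a y) x (le_trans hx (pvStep_snd_ge f a y))

-- the running-best scan over a list equals the scan over its first-occurrence dedup
theorem pvFold_ofList (f : String → Int) (l : List String) :
    ∀ (a : String × Int),
    (PySem.Set.ofList l).foldl (pvStep f) a = l.foldl (pvStep f) a := by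
  induction l with
  | nil => intro a; rfl
  | cons x t ih =>
    intro a
    rw [PySem.Set.ofList_cons]
    show ((PySem.Set.ofList t).filter (fun y => !y == x)).foldl (pvStep f) (pvStep f a x) = _
    rw [pvFold_filter_skip f _ (pvStep f a x) x (pvStep_snd_ge_f f a x), ih]
    rfl

-- run-length counting over a (≤)-sorted list yields exactly the multiset counts
theorem pvRunsGo_getD (l : List String) (d : PySem.Dict String Int)
    (hp : l.Pairwise (· ≤ ·)) : ∀ (v : String),
    (pvRunsGo l d).getD v 0 = if v ∈ l then (l.count v : Int) else d.getD v 0 := by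
  induction l, d using pvRunsGo.induct with
  | case1 d => intro v; simp [pvRunsGo]
  | case2 d x t same rest ih =>
    intro v
    have hsplit : same ++ rest = t := List.takeWhile_append_dropWhile
    have hsame : ∀ y ∈ same, y = x := fun y hy => by
      simpa using List.mem_takeWhile_imp hy
    have hrest_pw : rest.Pairwise (· ≤ ·) :=
      List.Pairwise.sublist
        ((List.dropWhile_sublist _).trans (List.sublist_cons_self x t)) hp
    have hx_notin : x ∉ rest := by
      intro hx
      cases hrest : rest with
      | nil => rw [hrest] at hx; exact absurd hx (List.not_mem_nil)
      | cons y r' =>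
        have hne : ¬(y = x) := by
          have w : List.dropWhile (fun z => z == x) t ≠ [] := by
            show rest ≠ []
            rw [hrest]; simp
          have hh := List.head_dropWhile_not (fun z => z == x) w
          have h1 : rest.head? = some y := by rw [hrest]; rfl
          have h2 : rest.head? = some ((List.dropWhile (fun z => z == x) t).head w) :=
            List.head?_eq_some_head w
          rw [h1] at h2
          rw [← Option.some_inj.mp h2] at hh
          simpa using hh
        have hxle : ∀ z ∈ t, x ≤ z := by
          intro z hz; exact (List.pairwise_cons.mp hp).1 z hz
        have hyt : y ∈ t := by
          rw [← hsplit, hrest]; simp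
        have hygt : x < y := lt_of_le_of_ne (hxle y hyt) (fun h => hne h.symm)
        rw [hrest] at hx
        rcases List.mem_cons.mp hx with h | h
        · exact hne h.symm
        · have hyz : y ≤ x := by
            rw [hrest] at hrest_pw
            exact (List.pairwise_cons.mp hrest_pw).1 x h
          exact absurd hyz (not_le_of_gt hygt)
    have hcount_same_x : same.count x = same.length := by
      rw [List.count_eq_length]; intro b hb; exact (hsame b hb).symm
    rw [pvRunsGo, ih hrest_pw v]
    by_cases hv : v = x
    · subst hv
      rw [if_neg hx_notin, if_pos (by simp), PySem.Dict.getD_insert_self]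
      have : (v :: t).count v = 1 + same.length := by
        rw [List.count_cons_self, ← hsplit, List.count_append, hcount_same_x,
          List.count_eq_zero.mpr hx_notin]
        omega
      rw [this]
    · have hvsame : v ∉ same := fun h => hv (hsame v h)
      have hcv : t.count v = rest.count v := by
        rw [← hsplit, List.count_append, List.count_eq_zero.mpr hvsame, Nat.zero_add]
      by_cases hvr : v ∈ rest
      · rw [if_pos hvr, if_pos (by
          rw [← hsplit]
          exact List.mem_cons.mpr (Or.inr (List.mem_append.mpr (Or.inr hvr))))]
        simp [List.count_cons, hcv]
        exact fun h => hv h.symm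
      · rw [if_neg hvr, if_neg (by
          intro h
          rcases List.mem_cons.mp h with h | h
          · exact hv h
          · rw [← hsplit] at h
            rcases List.mem_append.mp h with h | h
            · exact hvsame h
            · exact hvr h)]
        rw [PySem.Dict.getD_insert, if_neg hv]

-- hence B's count table is the frequency of each location in the input
theorem pvCounts_getD (locations : List String) (v : String) :
    (pvRunsGo (PySem.List.sorted locations (fun x => x) false) PySem.Dict.empty).getD v 0
      = (locations.count v : Int) := by
  set srt := PySem.List.sorted locations (fun x => x) false with hsrt
  have hperm : srt.Perm locations := PySem.List.sorted_perm locations (fun x => x) false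
  rw [pvRunsGo_getD srt PySem.Dict.empty (PySem.List.sorted_pairwise locations (fun x => x)) v]
  by_cases hv : v ∈ srt
  · rw [if_pos hv, hperm.count_eq]
  · rw [if_neg hv]
    have : locations.count v = 0 :=
      List.count_eq_zero.mpr (fun h => hv (hperm.mem_iff.mpr h))
    simp [this, PySem.Dict.getD]

-- A's loop body (two overwrites at the same key) is a single weighted insert
theorem aStep_eq (title : String) (d : PySem.Dict String Int) (loc : String) :
    (let d' := if !(title == "") && PySem.Str.isIn loc title
               then d.insert loc (d.getD loc 0 + 3) else d
     d'.insert loc (d'.getD loc 0 + 1))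
    = d.insert loc (d.getD loc 0 + pvWeight title loc) := by
  by_cases h : (!(title == "") && PySem.Str.isIn loc title) = true
  · simp only [h, if_true, pvWeight, PySem.Dict.getD_insert_self,
      PySem.Dict.insert_insert_self]
    congr 1; omega
  · simp only [pvWeight, if_neg h]

-- lookup in a weighted-insert fold
theorem wfold_getD (title : String) (l : List String) (d : PySem.Dict String Int) (v : String) :
    (l.foldl (fun d loc => d.insert loc (d.getD loc 0 + pvWeight title loc)) d).getD v 0
      = d.getD v 0 + (l.count v : Int) * pvWeight title v := by
  induction l generalizing d with
  | nil => simp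
  | cons x t ih =>
    rw [List.foldl_cons, ih, PySem.Dict.getD_insert]
    by_cases hv : v = x
    · subst hv; simp
      ring
    · simp [hv, Ne.symm hv]

-- Python's first-maximal max over a nonempty mapped list IS the running-best fold
theorem maxgo (f : String → Int) (t : List String) (m : String × Int) :
    PySem.List.max? (m :: t.map (fun k => (k, f k))) (fun x => x.2)
    = some (t.foldl (pvStep f) m) := by
  induction t generalizing m with
  | nil => simp [PySem.List.max?]
  | cons x rest ih =>
    have ih' := fun m' => ih m'
    simp only [PySem.List.max?, List.foldl_cons, List.map_cons, pvStep] at ih' ⊢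
    by_cases h : m.2 < f x
    · simpa [h] using ih' (x, f x)
    · simpa [h] using ih' m

-- selection step: first-maximal item of the mapped list = running-best over the keys
theorem sel_eq (f : String → Int) (S : List String) (hS : S ≠ [])
    (hpos : ∀ k ∈ S, -1 < f k) :
    ((PySem.List.max? (S.map fun k => (k, f k)) (fun x => x.2)).getD ("", 0)).1
    = (S.foldl (pvStep f) (("" : String), (-1 : Int))).1 := by
  cases S with
  | nil => exact absurd rfl hS
  | cons s t =>
    have hs : ((("" : String), (-1 : Int)) : String × Int).2 < f s := hpos s (by simp)
    rw [List.map_cons, maxgo f t (s, f s), List.foldl_cons]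
    have : pvStep f ("", -1) s = (s, f s) := by rw [pvStep, if_pos hs]
    rw [this]; rfl

theorem get_primary_location_spec_aux (locations : List String) (title : String) :
    get_primary_location locations title = get_primary_location_alt locations title := by
  by_cases hnil : locations = []
  · simp [hnil, get_primary_location, get_primary_location_alt]
  · unfold get_primary_location get_primary_location_alt
    rw [if_neg hnil]
    set f : String → Int := fun k => (locations.count k : Int) * pvWeight title k with hf
    -- A's loop body as a single weighted insert
    have ha : (fun (d : PySem.Dict String Int) loc =>
        let d' := if !(title == "") && PySem.Str.isIn loc title
                  then d.insert loc (d.getD loc 0 + 3) else d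
        d'.insert loc (d'.getD loc 0 + 1))
        = fun d loc => d.insert loc (d.getD loc 0 + pvWeight title loc) := by
      funext d loc; exact aStep_eq title d loc
    simp only [ha]
    set dA : PySem.Dict String Int :=
      locations.foldl (fun d loc => d.insert loc (d.getD loc 0 + pvWeight title loc))
        PySem.Dict.empty with hdA
    have hkA : dA.keys = PySem.Set.ofList locations := by
      rw [hdA, PySem.Dict.keys_foldl_insert locations
        (fun d x => d.getD x 0 + pvWeight title x) PySem.Dict.empty]
      simp [PySem.Set.update_nil_left]
    have hnd : dA.keys.Nodup := by rw [hkA]; exact PySem.Set.nodup_ofList locations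
    have hitems : dA.items = (PySem.Set.ofList locations).map (fun k => (k, f k)) := by
      rw [PySem.Dict.items_eq_map_keys dA hnd 0, hkA]
      refine List.map_congr_left (fun k _ => ?_)
      rw [hdA, wfold_getD, hf]; simp
    -- B's scan body is pvStep f (its count table holds the exact frequencies)
    have hb : (fun (acc : String × Int) loc =>
        let w := (pvRunsGo (PySem.List.sorted locations (fun x => x) false)
                    PySem.Dict.empty).getD loc 0 *
                 (if !(title == "") && PySem.Str.isIn loc title then 4 else 1)
        if acc.2 < w then (loc, w) else acc) = pvStep f := by
      funext acc loc
      simp only [pvStep, hf, pvWeight, pvCounts_getD]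
    simp only [PySem.List.maxD, hitems, hb]
    rw [sel_eq f (PySem.Set.ofList locations)
      (by
        intro h
        cases locations with
        | nil => exact hnil rfl
        | cons a l =>
            have hmem : a ∈ PySem.Set.ofList (a :: l) :=
              (PySem.Set.mem_ofList (a :: l) a).mpr (by simp)
            rw [h] at hmem; simp at hmem)
      (by
        intro k hk
        have hmem : k ∈ locations := (PySem.Set.mem_ofList locations k).mp hk
        have hc : 1 ≤ (locations.count k : Int) := by
          exact_mod_cast List.count_pos_iff.mpr hmem
        have hw := pvWeight_pos title k
        rw [hf]; nlinarith)]
    rw [pvFold_ofList]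

-- ===== VERDICT (by name: the statement is the Claim_ definition above) =====
theorem get_primary_location_spec : Claim_equal_get_primary_location := by
  intro locations title _
  exact get_primary_location_spec_aux locations title
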